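-- pv_equiv track=rewrite | github.com/IlariaCattaneo/Algorithms-Data-Structures | Vecchi esami Algo/final.py | offerta_speciale
-- ===== SOURCE A (Python) =====
-- def offerta_speciale(P):
--     X = sorted(P)               # ordina i pezzi per prezzo
--     i = len(X)                  # partendo dall'ultimo (più costoso)
--     c = 0                       # costo totale
--     while i >= 3:               # finché si fanno gruppi di tre
--         i = i - 3               # aggiungi il costo dei due maggiori
--         c = c + X[i+1] + X[i+2]
--     while i > 0:                # in ultimo aggiungi i rimanenti costi
--         i = i - 1
--         c = c + X[i]
--     return c
-- ===== SOURCE B (Python) =====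
-- def offerta_speciale(P):
--     c = 0
--     for pos, x in enumerate(sorted(P)[::-1]):
--         if pos % 3 != 2:
--             c = c + x
--     return c
-- ===== Notes on version B (the rewrite author's own statement) =====
-- stated objective: alternative
-- what changed: A walks the ascending-sorted list top-down with two while loops and explicit index arithmetic, paying the two priciest of each triple and then the leftovers; B makes a single filtered pass over the descending-sorted list, adding every price whose position mod 3 is not 2 (every third item, the cheapest of its triple, is free).
import Mathlib
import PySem

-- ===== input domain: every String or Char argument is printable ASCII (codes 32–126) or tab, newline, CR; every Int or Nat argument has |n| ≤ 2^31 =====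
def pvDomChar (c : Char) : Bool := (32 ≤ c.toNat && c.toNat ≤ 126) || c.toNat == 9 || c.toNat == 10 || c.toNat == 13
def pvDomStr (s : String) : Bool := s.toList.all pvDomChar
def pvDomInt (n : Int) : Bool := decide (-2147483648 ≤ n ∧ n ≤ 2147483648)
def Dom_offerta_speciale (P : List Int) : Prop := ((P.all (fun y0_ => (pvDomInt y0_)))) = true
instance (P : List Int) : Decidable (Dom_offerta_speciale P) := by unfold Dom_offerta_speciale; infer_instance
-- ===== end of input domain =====

-- B replaces A's two index-arithmetic while loops over the ascending-sorted list by a single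
-- filtered pass over the descending-sorted list that skips every third position; objective:
-- alternative (same asymptotic cost, different traversal and decomposition).


-- ===== PORT A =====
-- first while loop: while i >= 3: i = i - 3; c = c + X[i+1] + X[i+2]
def pvALoop1 (X : List Int) (i : Nat) (c : Int) : Nat × Int :=
  if 3 ≤ i then
    pvALoop1 X (i - 3) (c + PySem.List.pyGetD X ((i : Int) - 3 + 1) 0
                          + PySem.List.pyGetD X ((i : Int) - 3 + 2) 0)
  else (i, c)
termination_by i

-- second while loop: while i > 0: i = i - 1; c = c + X[i]
def pvALoop2 (X : List Int) (i : Nat) (c : Int) : Int :=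
  if 0 < i then pvALoop2 X (i - 1) (c + PySem.List.pyGetD X ((i : Int) - 1) 0)
  else c
termination_by i

def offerta_speciale (P : List Int) : Int :=
  let X := PySem.List.sorted P (fun x => x) false
  let p := pvALoop1 X X.length 0
  pvALoop2 X p.1 p.2

-- ===== PORT B =====
-- sorted(P)[::-1] is the reverse of the ascending sort (PySem.List.slice?_none_none_neg_one);
-- then one fold over enumerate, adding x unless pos % 3 == 2.
def offerta_speciale_alt (P : List Int) : Int :=
  (PySem.List.enumerate ((PySem.List.sorted P (fun x => x) false).reverse) 0).foldl
    (fun c px => if PySem.Int.mod px.1 3 ≠ 2 then c + px.2 else c) 0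

-- ===== PRECONDITION & SPEC =====
def Spec_offerta_speciale (P : List Int) (out : Int) : Prop := out = offerta_speciale_alt P
instance (P : List Int) (out : Int) : Decidable (Spec_offerta_speciale P out) := by unfold Spec_offerta_speciale; infer_instance

-- ===== CLAIM (what is proved, stated in full; the proofs are below) =====
def Claim_equal_offerta_speciale : Prop := ∀ (P : List Int), Dom_offerta_speciale P → Spec_offerta_speciale P (offerta_speciale P)

-- ===== LEMMAS AND PROOFS =====

theorem pv_sum_take_succ (X : List Int) (i : Nat) (h : i < X.length) :
    (X.take (i + 1)).sum = (X.take i).sum + X.getD i 0 := by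
  rw [List.take_add_one]
  simp [List.getD, h]

theorem pvALoop2_eq (X : List Int) (i : Nat) (h : i ≤ X.length) (c : Int) :
    pvALoop2 X i c = c + (X.take i).sum := by
  induction i generalizing c with
  | zero => rw [pvALoop2]; simp
  | succ k ih =>
    rw [pvALoop2]
    have hk : k < X.length := by omega
    have hc : ((k : Int) + 1 - 1) = (k : Nat) := by ring
    simp only [Nat.succ_sub_one, if_pos (Nat.succ_pos k), Nat.cast_succ, hc,
      PySem.List.pyGetD_natCast]
    rw [ih (by omega), pv_sum_take_succ X k hk]
    ring

theorem pvALoop1_eq (m : Nat) (r : Nat) (hr : r < 3) (X : List Int)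
    (h : r + 3 * m ≤ X.length) (c : Int) :
    pvALoop2 X (pvALoop1 X (r + 3 * m) c).1 (pvALoop1 X (r + 3 * m) c).2
      = c + (X.take (r + 3 * m)).sum
          - ((List.range m).map (fun k => X.getD (r + 3 * k) 0)).sum := by
  induction m generalizing c with
  | zero =>
    rw [pvALoop1]
    simp only [if_neg (by omega : ¬ 3 ≤ r + 3 * 0)]
    rw [pvALoop2_eq X (r + 3 * 0) (by omega)]
    simp
  | succ m ih =>
    rw [pvALoop1]
    have h3 : 3 ≤ r + 3 * (m + 1) := by omega
    have e1 : ((r + 3 * (m + 1) : Nat) : Int) - 3 + 1 = ((r + 3 * m + 1 : Nat) : Int) := by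
      push_cast; ring
    have e2 : ((r + 3 * (m + 1) : Nat) : Int) - 3 + 2 = ((r + 3 * m + 2 : Nat) : Int) := by
      push_cast; ring
    have esub : r + 3 * (m + 1) - 3 = r + 3 * m := by omega
    simp only [if_pos h3, e1, e2, esub, PySem.List.pyGetD_natCast]
    rw [ih (by omega)]
    have h0 : r + 3 * m < X.length := by omega
    have h1 : r + 3 * m + 1 < X.length := by omega
    have h2 : r + 3 * m + 2 < X.length := by omega
    have t3 : (X.take (r + 3 * (m + 1))).sum
        = (X.take (r + 3 * m)).sum + X.getD (r + 3 * m) 0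
          + X.getD (r + 3 * m + 1) 0 + X.getD (r + 3 * m + 2) 0 := by
      have : r + 3 * (m + 1) = (r + 3 * m + 1 + 1) + 1 := by omega
      rw [this, pv_sum_take_succ X _ h2, pv_sum_take_succ X _ h1, pv_sum_take_succ X _ h0]
    rw [t3, List.range_succ]
    simp
    ring

-- B's fold over enumerate, with an arbitrary start position, as a Finset sum
theorem pvBFold_eq (Z : List Int) (s : Nat) (c : Int) :
    (PySem.List.enumerate Z (s : Int)).foldl
      (fun c px => if PySem.Int.mod px.1 3 ≠ 2 then c + px.2 else c) c
      = c + ∑ i ∈ Finset.range Z.length, (if (s + i) % 3 = 2 then 0 else Z.getD i 0) := by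
  induction Z generalizing s c with
  | nil => simp [PySem.List.enumerate_nil]
  | cons z Z ih =>
    rw [PySem.List.enumerate_cons, List.foldl_cons]
    have hm : PySem.Int.mod (s : Int) 3 = ((s % 3 : Nat) : Int) := by
      exact_mod_cast PySem.Int.mod_natCast s 3
    have hs1 : (s : Int) + 1 = ((s + 1 : Nat) : Int) := by push_cast; ring
    rw [hs1, ih]
    have hsum : ∑ i ∈ Finset.range (z :: Z).length, (if (s + i) % 3 = 2 then 0 else (z :: Z).getD i 0)
        = (∑ i ∈ Finset.range Z.length, (if ((s + 1) + i) % 3 = 2 then 0 else Z.getD i 0))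
          + (if s % 3 = 2 then 0 else z) := by
      rw [List.length_cons, Finset.sum_range_succ']
      have e0 : (if (s + 0) % 3 = 2 then (0:Int) else (z :: Z).getD 0 0)
          = if s % 3 = 2 then 0 else z := by simp
      rw [e0]
      congr 1
      apply Finset.sum_congr rfl
      intro i _
      have h' : s + (i + 1) = (s + 1) + i := by omega
      simp [h']
    rw [hsum]
    simp only [hm]
    by_cases h2 : s % 3 = 2
    · have : ¬ (((s % 3 : Nat) : Int) ≠ 2) := by simp [h2]
      rw [if_neg this, if_pos h2]
      ring
    · have : ((s % 3 : Nat) : Int) ≠ 2 := by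
        intro hc; apply h2; exact_mod_cast hc
      rw [if_pos this, if_neg h2]
      ring

theorem pv_map_range_sum (m : Nat) (f : Nat → Int) :
    ((List.range m).map f).sum = ∑ k ∈ Finset.range m, f k := by
  induction m with
  | zero => simp
  | succ m ih => rw [List.range_succ, Finset.sum_range_succ]; simp [ih]

theorem pv_sum_getD (Z : List Int) :
    ∑ i ∈ Finset.range Z.length, Z.getD i 0 = Z.sum := by
  induction Z with
  | nil => simp
  | cons z Z ih =>
    rw [List.length_cons, Finset.sum_range_succ']
    simp only [List.getD_cons_succ, List.getD_cons_zero]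
    rw [ih, List.sum_cons]
    ring

-- the skipped positions 2, 5, 8, … of Z collected as a range sum
theorem pv_skipped_sum (Z : List Int) :
    ∑ i ∈ Finset.range Z.length, (if i % 3 = 2 then Z.getD i 0 else 0)
      = ∑ k ∈ Finset.range (Z.length / 3), Z.getD (3 * k + 2) 0 := by
  rw [← Finset.sum_filter]
  apply Finset.sum_nbij' (fun i => (i - 2) / 3) (fun k => 3 * k + 2)
  · intro i hi
    simp only [Finset.mem_filter, Finset.mem_range] at hi
    simp only [Finset.mem_range]
    omega
  · intro k hk
    simp only [Finset.mem_range] at hk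
    simp only [Finset.mem_filter, Finset.mem_range]
    omega
  · intro i hi
    simp only [Finset.mem_filter, Finset.mem_range] at hi
    omega
  · intro k hk
    simp only [Finset.mem_range] at hk
    omega
  · intro i hi
    simp only [Finset.mem_filter, Finset.mem_range] at hi
    congr 1
    omega

theorem pv_reverse_getD (Y : List Int) (i : Nat) (h : i < Y.length) :
    Y.reverse.getD i 0 = Y.getD (Y.length - 1 - i) 0 := by
  rw [List.getD_eq_getElem _ _ (by simpa using h),
      List.getD_eq_getElem _ _ (by omega), List.getElem_reverse]

theorem pv_reflect (Y : List Int) :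
    ∑ k ∈ Finset.range (Y.length / 3), Y.getD (Y.length - 3 - 3 * k) 0
      = ∑ k ∈ Finset.range (Y.length / 3), Y.getD (Y.length % 3 + 3 * k) 0 := by
  rw [← Finset.sum_range_reflect (fun k => Y.getD (Y.length % 3 + 3 * k) 0)]
  apply Finset.sum_congr rfl
  intro k hk
  simp only [Finset.mem_range] at hk
  congr 1
  omega

-- ===== VERDICT (by name: the statement is the Claim_ definition above) =====
theorem offerta_speciale_spec : Claim_equal_offerta_speciale := by
  intro P _
  unfold Spec_offerta_speciale offerta_speciale offerta_speciale_alt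
  set Y := PySem.List.sorted P (fun x => x) false with hY
  simp only
  -- A side
  have hlen : Y.length = Y.length % 3 + 3 * (Y.length / 3) := (Nat.mod_add_div Y.length 3).symm
  have hA := pvALoop1_eq (Y.length / 3) (Y.length % 3) (Nat.mod_lt _ (by norm_num)) Y
    (by omega) 0
  rw [← hlen] at hA
  rw [hA]
  -- B side
  have h0 : ((0 : Nat) : Int) = (0 : Int) := rfl
  rw [← h0, pvBFold_eq]
  have hsplit : ∀ i : Nat, (if (0 + i) % 3 = 2 then (0:Int) else Y.reverse.getD i 0)
      = Y.reverse.getD i 0 - (if i % 3 = 2 then Y.reverse.getD i 0 else 0) := by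
    intro i
    simp only [Nat.zero_add]
    split_ifs <;> ring
  calc (0:Int) + (Y.take Y.length).sum
        - ((List.range (Y.length / 3)).map (fun k => Y.getD (Y.length % 3 + 3 * k) 0)).sum
      = Y.sum - ∑ k ∈ Finset.range (Y.length / 3), Y.getD (Y.length % 3 + 3 * k) 0 := by
        rw [List.take_length, pv_map_range_sum]
        ring
    _ = Y.sum - ∑ k ∈ Finset.range (Y.length / 3), Y.getD (Y.length - 3 - 3 * k) 0 := by
        rw [pv_reflect]
    _ = Y.sum - ∑ k ∈ Finset.range (Y.length / 3), Y.reverse.getD (3 * k + 2) 0 := by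
        congr 1
        apply Finset.sum_congr rfl
        intro k hk
        simp only [Finset.mem_range] at hk
        rw [pv_reverse_getD Y (3 * k + 2) (by omega)]
        congr 1
        omega
    _ = Y.reverse.sum - ∑ i ∈ Finset.range Y.reverse.length,
          (if i % 3 = 2 then Y.reverse.getD i 0 else 0) := by
        rw [List.sum_reverse, pv_skipped_sum]
        simp [List.length_reverse]
    _ = 0 + ∑ i ∈ Finset.range Y.reverse.length,
          (if (0 + i) % 3 = 2 then (0:Int) else Y.reverse.getD i 0) := by
        rw [Finset.sum_congr rfl (fun i _ => hsplit i), Finset.sum_sub_distrib,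
          ← pv_sum_getD Y.reverse]
        ring
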